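-- pv_equiv track=rewrite | github.com/mridulmalani2/financex | modeler/engine.py | _detect_total_line
-- ===== SOURCE A (Python) =====
-- def _detect_total_line(label: str) -> bool:
--     """
--     Detect if a source label is likely a "total" line based on naming patterns.
--     """
--     label_lower = label.lower()
--     total_indicators = [
--         'total', 'net', 'gross', 'subtotal', 'sum',
--         'aggregate', 'combined', 'overall'
--     ]
--     # Check for total indicators at start or after space
--     for indicator in total_indicators:
--         if label_lower.startswith(indicator) or f' {indicator}' in label_lower:
--             return True
--     return False
-- ===== SOURCE B (Python) =====
-- def _detect_total_line(label: str) -> bool: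
--     s = label.lower()
--     indicators = ['total', 'net', 'gross', 'subtotal', 'sum',
--                   'aggregate', 'combined', 'overall']
--     starts = [0] + [i + 1 for i, ch in enumerate(s) if ch == ' ']
--     return any(s[j:].startswith(ind) for j in starts for ind in indicators)
-- ===== Notes on version B (the rewrite author's own statement) =====
-- stated objective: alternative
-- what changed: B tokenizes once: it collects the word-start positions (0 and each index after a space) in one scan and tests each indicator only as a prefix at those positions, instead of A's eight whole-string startswith/substring searches.
import Mathlib
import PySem

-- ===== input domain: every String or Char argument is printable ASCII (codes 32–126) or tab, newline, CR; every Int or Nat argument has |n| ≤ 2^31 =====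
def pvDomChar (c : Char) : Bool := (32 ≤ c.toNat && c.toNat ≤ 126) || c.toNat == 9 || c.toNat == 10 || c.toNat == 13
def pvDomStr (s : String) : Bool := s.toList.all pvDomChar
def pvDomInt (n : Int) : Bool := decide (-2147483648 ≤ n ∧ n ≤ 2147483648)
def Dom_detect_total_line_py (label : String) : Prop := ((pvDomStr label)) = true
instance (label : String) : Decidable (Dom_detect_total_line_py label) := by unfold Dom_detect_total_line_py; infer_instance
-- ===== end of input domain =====

-- B replaces A's eight whole-string startswith/substring searches by one scan for word-start
-- positions followed by prefix tests there (objective: alternative decomposition, same result).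

-- ===== PORT A =====
-- A's for-loop over the indicator list with early 'return True'
def pvALoop (ll : String) : List String → Bool
  | [] => false
  | ind :: rest =>
    if PySem.Str.startswith ll ind || PySem.Str.isIn (" " ++ ind) ll then true
    else pvALoop ll rest

def detect_total_line_py (label : String) : Bool :=
  let label_lower := PySem.Str.lower label
  let total_indicators : List String :=
    ["total", "net", "gross", "subtotal", "sum", "aggregate", "combined", "overall"]
  pvALoop label_lower total_indicators

-- ===== PORT B =====
-- Source B's starts list: [0] + [i + 1 for i, ch in enumerate(s) if ch == ' ']
def pvStarts (s : List Char) : List Int :=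
  0 :: (PySem.List.enumerate s).filterMap (fun p => if p.2 = ' ' then some (p.1 + 1) else none)

-- s[j:].startswith(ind) — the slice is exact via PySem.List.slice on the lowered characters
def detect_total_line_py_alt (label : String) : Bool :=
  let s := PySem.Str.lower label
  let indicators : List String :=
    ["total", "net", "gross", "subtotal", "sum", "aggregate", "combined", "overall"]
  (pvStarts s.toList).any (fun j =>
    indicators.any (fun ind =>
      PySem.Chars.startswith (PySem.List.slice s.toList (some j) none) ind.toList))

-- ===== PRECONDITION & SPEC =====
def Spec_detect_total_line_py (label : String) (out : Bool) : Prop := out = detect_total_line_py_alt label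
instance (label : String) (out : Bool) : Decidable (Spec_detect_total_line_py label out) := by unfold Spec_detect_total_line_py; infer_instance

-- ===== CLAIM (what is proved, stated in full; the proofs are below) =====
def Claim_equal_detect_total_line_py : Prop := ∀ (label : String), Dom_detect_total_line_py label → Spec_detect_total_line_py label (detect_total_line_py label)

-- ===== LEMMAS AND PROOFS =====

-- A's early-return loop is the 'any' of its test
theorem pvALoop_eq_any (ll : String) (inds : List String) :
    pvALoop ll inds
      = inds.any (fun ind => PySem.Str.startswith ll ind || PySem.Str.isIn (" " ++ ind) ll) := by
  induction inds with
  | nil => rfl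
  | cons a t ih =>
    rw [List.any_cons, ← ih, pvALoop]
    cases hc : (PySem.Str.startswith ll a || PySem.Str.isIn (" " ++ a) ll)
    · simp
    · simp

-- membership in the enumerate/filterMap comprehension, with a free start offset
theorem pv_mem_spacePos (l : List Char) (k j : Int) :
    (j ∈ (PySem.List.enumerate l k).filterMap
        (fun p => if p.2 = ' ' then some (p.1 + 1) else none))
      ↔ ∃ i : Nat, ∃ h : i < l.length, l[i] = ' ' ∧ j = k + i + 1 := by
  induction l generalizing k with
  | nil => simp [PySem.List.enumerate_nil]
  | cons c t ih =>
    rw [PySem.List.enumerate_cons, List.filterMap_cons]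
    by_cases hc : c = ' '
    · rw [if_pos hc, List.mem_cons, ih]
      constructor
      · rintro (rfl | ⟨i, h, hg, rfl⟩)
        · exact ⟨0, by simp, by simpa using hc, by push_cast; ring⟩
        · refine ⟨i + 1, by simp only [List.length_cons]; omega, by simpa using hg, by push_cast; ring⟩
      · rintro ⟨i, h, hg, rfl⟩
        cases i with
        | zero => left; push_cast; ring
        | succ i =>
          right
          refine ⟨i, by simp only [List.length_cons] at h; omega, by simpa using hg, by push_cast; ring⟩
    · rw [if_neg hc, ih]
      constructor
      · rintro ⟨i, h, hg, rfl⟩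
        refine ⟨i + 1, by simp only [List.length_cons]; omega, by simpa using hg, by push_cast; ring⟩
      · rintro ⟨i, h, hg, rfl⟩
        cases i with
        | zero => exact absurd (by simpa using hg) hc
        | succ i =>
          refine ⟨i, by simp only [List.length_cons] at h; omega, by simpa using hg, by push_cast; ring⟩

-- the heart: 'prefix, or " "+ind occurs somewhere' ⟺ 'ind is a prefix at some word start'
theorem pv_main (cs p : List Char) :
    (PySem.Chars.startswith cs p = true ∨ PySem.Chars.isIn (' ' :: p) cs = true)
      ↔ ∃ j ∈ pvStarts cs, p <+: PySem.List.slice cs (some j) none := by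
  constructor
  · rintro (h | h)
    · exact ⟨0, List.mem_cons_self, by
        rw [show (0 : Int) = ((0 : Nat) : Int) from rfl, PySem.List.slice_from_natCast]
        simpa using (PySem.Chars.startswith_iff cs p).1 h⟩
    · obtain ⟨m, hm⟩ := (PySem.Chars.exists_prefix_drop_iff_isIn (' ' :: p) cs).2 h
      have hmlt : m < cs.length := by
        by_contra hge
        rw [List.drop_eq_nil_of_le (by omega)] at hm
        exact absurd hm.length_le (by simp)
      rw [List.drop_eq_getElem_cons hmlt, List.cons_prefix_cons] at hm
      refine ⟨(m : Int) + 1, ?_, ?_⟩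
      · exact List.mem_cons_of_mem _
          ((pv_mem_spacePos cs 0 _).2 ⟨m, hmlt, hm.1.symm, by ring⟩)
      · rw [show ((m : Int) + 1) = (((m + 1 : Nat)) : Int) by push_cast; ring,
           PySem.List.slice_from_natCast]
        exact hm.2
  · rintro ⟨j, hj, hpre⟩
    rcases List.mem_cons.1 hj with rfl | hj
    · left
      rw [show (0 : Int) = ((0 : Nat) : Int) from rfl, PySem.List.slice_from_natCast] at hpre
      exact (PySem.Chars.startswith_iff cs p).2 (by simpa using hpre)
    · obtain ⟨i, hlt, hg, rfl⟩ := (pv_mem_spacePos cs 0 j).1 hj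
      right
      rw [show ((0 : Int) + i + 1) = (((i + 1 : Nat)) : Int) by push_cast; ring,
         PySem.List.slice_from_natCast] at hpre
      refine (PySem.Chars.exists_prefix_drop_iff_isIn (' ' :: p) cs).1 ⟨i, ?_⟩
      rw [List.drop_eq_getElem_cons hlt, List.cons_prefix_cons]
      exact ⟨hg.symm, hpre⟩

-- ===== VERDICT (by name: the statement is the Claim_ definition above) =====
theorem detect_total_line_py_spec : Claim_equal_detect_total_line_py := by
  intro label _
  unfold Spec_detect_total_line_py detect_total_line_py detect_total_line_py_alt
  rw [pvALoop_eq_any, Bool.eq_iff_iff]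
  simp only [List.any_eq_true, Bool.or_eq_true, PySem.Str.startswith_eq, PySem.Str.isIn_eq,
    PySem.Chars.startswith_iff]
  constructor
  · rintro ⟨ind, hind, h⟩
    have h' := (pv_main (PySem.Str.lower label).toList ind.toList).1 (by
      rcases h with h | h
      · left; exact (PySem.Chars.startswith_iff _ _).2 h
      · right; simpa [String.toList_append] using h)
    obtain ⟨j, hj, hp⟩ := h'
    exact ⟨j, hj, ind, hind, hp⟩
  · rintro ⟨j, hj, ind, hind, hp⟩
    have h' := (pv_main (PySem.Str.lower label).toList ind.toList).2 ⟨j, hj, hp⟩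
    refine ⟨ind, hind, ?_⟩
    rcases h' with h | h
    · left; exact (PySem.Chars.startswith_iff _ _).1 h
    · right; simpa [String.toList_append] using h
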